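-- pv_equiv track=rewrite | github.com/hailangzz/Vimicro-Project-luchang | 红绿灯识别项目/traffic_light_detection-训练数据集处理/实际DVR检测图像处理/test.py | dizeng
-- ===== SOURCE A (Python) =====
-- def dizeng(list,diff_number = 7):
--     l1 = []
--     l2 = []
--     for i in range(0,len(list)-1):
--         if list[i]+diff_number==list[i+1]:
--             l2.append(list[i])
--             l2.append(list[i+1])
--             if i==len(list)-2:
--                 l1.append(l2)
--         else:
--             l1.append(l2)
--             l2=[]
--             continue
--
--     l1_1 = [i for i in l1 if i]
--     l1_2 = []
--     for a in l1_1: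
--         list2 = []
--         [list2.append(i) for i in a if not i in list2]
--         l1_2.append(list2)
--     return(l1_2)
-- ===== SOURCE B (Python) =====
-- def dizeng(list, diff_number=7):
--     # Phase 1: adjacency mask over neighbouring pairs.
--     linked = [list[i] + diff_number == list[i + 1] for i in range(len(list) - 1)]
--     # Phase 2: extract [start, end) index bounds of maximal True blocks.
--     bounds = []
--     start = None
--     for i, flag in enumerate(linked):
--         if flag:
--             if start is None:
--                 start = i
--         elif start is not None:
--             bounds.append((start, i))
--             start = None
--     if start is not None:
--         bounds.append((start, len(linked)))
--     # Phase 3: each block start..end covers elements start..end+1; dedup preserving order.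
--     out = []
--     for s, e in bounds:
--         dedup = []
--         for x in list[s:e + 1]:
--             if x not in dedup:
--                 dedup.append(x)
--         out.append(dedup)
--     return out
-- ===== Notes on version B (the rewrite author's own statement) =====
-- stated objective: alternative
-- what changed: B decomposes the task into three separate phases - precompute a boolean adjacency mask, scan it once to extract [start,end) index bounds of each maximal True block, then dedup each slice of the input - instead of A's single index loop that accumulates doubled pair-lists (including empties) and post-filters them.
import Mathlib
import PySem

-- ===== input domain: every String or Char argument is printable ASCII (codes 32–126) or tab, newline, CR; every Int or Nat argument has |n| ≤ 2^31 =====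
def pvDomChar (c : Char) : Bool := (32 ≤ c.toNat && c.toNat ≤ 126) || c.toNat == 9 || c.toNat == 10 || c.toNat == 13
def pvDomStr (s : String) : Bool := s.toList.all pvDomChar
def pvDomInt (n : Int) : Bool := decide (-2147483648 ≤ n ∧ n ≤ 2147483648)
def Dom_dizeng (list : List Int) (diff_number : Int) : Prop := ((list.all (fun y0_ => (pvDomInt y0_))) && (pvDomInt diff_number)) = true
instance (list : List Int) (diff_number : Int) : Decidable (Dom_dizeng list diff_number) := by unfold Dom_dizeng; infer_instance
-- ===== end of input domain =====

-- B re-implements A by a different decomposition (adjacency mask → block bounds → deduped slices); same asymptotic cost ('alternative').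

-- ===== PORT A =====
-- literal transliteration of A: one pass over i in range(0, len-1) carrying (l1, l2),
-- then filter out empty lists, then per-list order-preserving dedup.
def dizeng (list : List Int) (diff_number : Int) : List (List Int) :=
  (((PySem.List.pyRange 0 ((list.length : Int) - 1) 1).foldl
      (fun (s : List (List Int) × List Int) i =>
        if PySem.List.pyGetD list i 0 + diff_number == PySem.List.pyGetD list (i + 1) 0 then
          if i == (list.length : Int) - 2 then
            (s.1 ++ [s.2 ++ [PySem.List.pyGetD list i 0, PySem.List.pyGetD list (i + 1) 0]],
             s.2 ++ [PySem.List.pyGetD list i 0, PySem.List.pyGetD list (i + 1) 0])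
          else
            (s.1, s.2 ++ [PySem.List.pyGetD list i 0, PySem.List.pyGetD list (i + 1) 0])
        else
          (s.1 ++ [s.2], ([] : List Int)))
      ([], [])).1.filter (fun x => !x.isEmpty)).map
    (fun a => a.foldl (fun list2 i => if list2.contains i then list2 else list2 ++ [i]) [])

-- ===== PORT B =====
-- helper of Source B's phase 3: order-preserving dedup of one slice
def pyDedup (xs : List Int) : List Int :=
  xs.foldl (fun dp x => if dp.contains x then dp else dp ++ [x]) []

-- literal transliteration of B: adjacency mask, then [start, end) bounds of maximal True blocks, then deduped slices.
def dizeng_alt (list : List Int) (diff_number : Int) : List (List Int) :=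
  (match ((PySem.List.enumerate ((PySem.List.pyRange 0 ((list.length : Int) - 1) 1).map
        (fun i => PySem.List.pyGetD list i 0 + diff_number == PySem.List.pyGetD list (i + 1) 0))).foldl
      (fun (s : List (Int × Int) × Option Int) (p : Int × Bool) =>
        if p.2 then
          match s.2 with
          | none => (s.1, some p.1)
          | some _ => s
        else
          match s.2 with
          | some st0 => (s.1 ++ [(st0, p.1)], none)
          | none => s)
      ([], none)) with
    | (bs, some st0) =>
        bs ++ [(st0, ((((PySem.List.pyRange 0 ((list.length : Int) - 1) 1).map
            (fun i => PySem.List.pyGetD list i 0 + diff_number == PySem.List.pyGetD list (i + 1) 0)).length : Nat) : Int))]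
    | (bs, none) => bs).map
    (fun (se : Int × Int) => pyDedup (PySem.List.slice list (some se.1) (some (se.2 + 1))))

-- ===== PRECONDITION & SPEC =====
def Spec_dizeng (list : List Int) (diff_number : Int) (out : List (List Int)) : Prop := out = dizeng_alt list diff_number
instance (list : List Int) (diff_number : Int) (out : List (List Int)) : Decidable (Spec_dizeng list diff_number out) := by unfold Spec_dizeng; infer_instance

-- ===== CLAIM (what is proved, stated in full; the proofs are below) =====
def Claim_equal_dizeng : Prop := ∀ (list : List Int) (diff_number : Int), Dom_dizeng list diff_number → Spec_dizeng list diff_number (dizeng list diff_number)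

-- ===== LEMMAS AND PROOFS =====

-- dedup step and fold (both ports' dedup loops are this fold)
def dstep (acc : List Int) (x : Int) : List Int := if acc.contains x then acc else acc ++ [x]
def ddF (acc xs : List Int) : List Int := xs.foldl dstep acc

lemma mem_ddF (ys : List Int) (acc : List Int) (a : Int) (h : a ∈ acc ∨ a ∈ ys) : a ∈ ddF acc ys := by
  induction ys generalizing acc with
  | nil => simpa [ddF] using h.resolve_right (by simp)
  | cons y ys ih =>
      have hsub : a ∈ acc ∨ a = y → a ∈ dstep acc y := by
        intro hc
        unfold dstep
        rcases hc with hc | hc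
        · split <;> simp [hc]
        · subst hc
          split
          · next hcon => exact List.mem_of_elem_eq_true hcon
          · simp
      show a ∈ ddF (dstep acc y) ys
      rcases h with h | h
      · exact ih _ (Or.inl (hsub (Or.inl h)))
      · rcases List.mem_cons.mp h with h | h
        · exact ih _ (Or.inl (hsub (Or.inr h)))
        · exact ih _ (Or.inr h)

lemma ddF_append (acc xs ys : List Int) : ddF acc (xs ++ ys) = ddF (ddF acc xs) ys := by
  simp [ddF, List.foldl_append]

lemma dstep_of_mem (acc : List Int) (a : Int) (h : a ∈ acc) : dstep acc a = acc := by
  simp [dstep, h]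

-- Nat-level step functions (the ports' loops, with indices as Nat)
def stepA (L : List Int) (d : Int) (n : Nat) (s : List (List Int) × List Int) (i : Nat) :
    List (List Int) × List Int :=
  if L.getD i 0 + d == L.getD (i + 1) 0 then
    if i + 2 == n then
      (s.1 ++ [s.2 ++ [L.getD i 0, L.getD (i + 1) 0]], s.2 ++ [L.getD i 0, L.getD (i + 1) 0])
    else (s.1, s.2 ++ [L.getD i 0, L.getD (i + 1) 0])
  else (s.1 ++ [s.2], [])

def stepB (L : List Int) (d : Int) (s : List (Int × Int) × Option Int) (k : Nat) :
    List (Int × Int) × Option Int :=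
  if L.getD k 0 + d == L.getD (k + 1) 0 then
    match s.2 with
    | none => (s.1, some (k : Int))
    | some _ => s
  else
    match s.2 with
    | some st0 => (s.1 ++ [(st0, (k : Int))], none)
    | none => s

-- the coupling invariant after processing mask indices [0, k)
def CoupInv (L : List Int) (k : Nat) (sa : List (List Int) × List Int)
    (sb : List (Int × Int) × Option Int) : Prop :=
  ((sa.1.filter (fun x => !x.isEmpty)).map (ddF []) =
      sb.1.map (fun se => ddF [] (PySem.List.slice L (some se.1) (some (se.2 + 1))))) ∧
  (match sb.2 with
   | none => sa.2 = []
   | some s =>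
      ∃ sn : Nat, s = (sn : Int) ∧ sn < k ∧ sa.2 ≠ [] ∧
        ∀ acc, ddF acc sa.2 = ddF acc ((L.drop sn).take (k - sn + 1)))

lemma run_take_succ (L : List Int) (sn j : Nat) (h : sn + j < L.length) :
    (L.drop sn).take (j + 1) = (L.drop sn).take j ++ [L.getD (sn + j) 0] := by
  have hj : j < (L.drop sn).length := by simp; omega
  rw [List.take_succ]
  simp [List.getElem?_drop, List.getD_eq_getElem?_getD, List.getElem?_eq_getElem h]

lemma getD_mem_run (L : List Int) (sn k : Nat) (hsk : sn ≤ k) (hk : k < L.length) :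
    L.getD k 0 ∈ (L.drop sn).take (k - sn + 1) := by
  have h1 : (L.drop sn).take (k - sn + 1) = (L.drop sn).take (k - sn) ++ [L.getD (sn + (k - sn)) 0] :=
    run_take_succ L sn (k - sn) (by omega)
  have h2 : sn + (k - sn) = k := by omega
  rw [h1, h2]
  simp

lemma run_pair (L : List Int) (k : Nat) (hk : k + 1 < L.length) :
    (L.drop k).take 2 = [L.getD k 0, L.getD (k + 1) 0] := by
  have e1 : (L.drop k).take 2 = (L.drop k).take 1 ++ [L.getD (k + 1) 0] := by
    have := run_take_succ L k 1 (by omega)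
    simpa using this
  have e2 : (L.drop k).take 1 = [L.getD k 0] := by
    have := run_take_succ L k 0 (by omega)
    simpa using this
  rw [e1, e2]; rfl

lemma ddF_extend (L : List Int) (sn k : Nat) (l2 : List Int) (hsk : sn ≤ k) (hk : k + 1 < L.length)
    (hdd : ∀ acc, ddF acc l2 = ddF acc ((L.drop sn).take (k - sn + 1))) (acc : List Int) :
    ddF acc (l2 ++ [L.getD k 0, L.getD (k + 1) 0]) = ddF acc ((L.drop sn).take (k + 1 - sn + 1)) := by
  have hmem : L.getD k 0 ∈ (L.drop sn).take (k - sn + 1) := getD_mem_run L sn k hsk (by omega)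
  have hrun : (L.drop sn).take (k + 1 - sn + 1) =
      (L.drop sn).take (k - sn + 1) ++ [L.getD (k + 1) 0] := by
    have h := run_take_succ L sn (k - sn + 1) (by omega)
    have e1 : k + 1 - sn + 1 = (k - sn + 1) + 1 := by omega
    have e2 : sn + (k - sn + 1) = k + 1 := by omega
    rw [e1, h, e2]
  have step1 : ddF acc (l2 ++ [L.getD k 0, L.getD (k + 1) 0]) =
      dstep (dstep (ddF acc l2) (L.getD k 0)) (L.getD (k + 1) 0) := by
    simp [ddF, List.foldl_append]
  rw [step1, hdd acc, dstep_of_mem _ _ (mem_ddF _ _ _ (Or.inr hmem)), hrun, ddF_append]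
  simp [ddF]

lemma slice_run (L : List Int) (sn j : Nat) :
    PySem.List.slice L (some (sn : Int)) (some ((j : Int) + 1)) = (L.drop sn).take (j + 1 - sn) := by
  rw [show ((j : Int) + 1) = ((j + 1 : Nat) : Int) by push_cast; ring, PySem.List.slice_natCast]

lemma inv_main (L : List Int) (d : Int) (k : Nat) (hk : k + 1 < L.length) :
    CoupInv L k ((List.range k).foldl (stepA L d L.length) ([], []))
      ((List.range k).foldl (stepB L d) ([], none)) := by
  induction k with
  | zero => exact ⟨by simp, by simp⟩
  | succ k ih =>
      have hk' : k + 1 < L.length := by omega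
      have hI := ih hk'
      unfold CoupInv at hI
      obtain ⟨C1, C2⟩ := hI
      set sa := (List.range k).foldl (stepA L d L.length) ([], []) with hsa
      set sb := (List.range k).foldl (stepB L d) ([], none) with hsb
      rw [List.range_succ, List.foldl_append, List.foldl_append, ← hsa, ← hsb]
      simp only [List.foldl_cons, List.foldl_nil]
      unfold CoupInv
      by_cases hf : (L.getD k 0 + d == L.getD (k + 1) 0) = true
      · have hg : (k + 2 == L.length) = false := by
          simp only [beq_eq_false_iff_ne, ne_eq]; omega
        cases hstart : sb.2 with
        | none =>
            rw [hstart] at C2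
            have hl2 : sa.2 = [] := C2
            refine ⟨?_, ?_⟩
            · simp only [stepA, stepB, hf, hg, hstart, Bool.false_eq_true, reduceIte]
              exact C1
            · simp only [stepA, stepB, hf, hg, hstart, Bool.false_eq_true, reduceIte]
              refine ⟨k, rfl, by omega, by simp [hl2], ?_⟩
              intro acc
              have hrun : (L.drop k).take (k + 1 - k + 1) = [L.getD k 0, L.getD (k + 1) 0] := by
                rw [show k + 1 - k + 1 = 2 by omega]
                exact run_pair L k hk'
              rw [hrun, hl2]
              simp
        | some s =>
            rw [hstart] at C2
            obtain ⟨sn, hs, hsn, hne, hdd⟩ := C2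
            refine ⟨?_, ?_⟩
            · simp only [stepA, stepB, hf, hg, hstart, Bool.false_eq_true, reduceIte]
              exact C1
            · simp only [stepA, stepB, hf, hg, hstart, Bool.false_eq_true, reduceIte]
              exact ⟨sn, hs, by omega, by simp, ddF_extend L sn k sa.2 (by omega) hk' hdd⟩
      · have hf' : (L.getD k 0 + d == L.getD (k + 1) 0) = false := by
          simpa using hf
        cases hstart : sb.2 with
        | none =>
            rw [hstart] at C2
            refine ⟨?_, by simp only [stepA, stepB, hf', hstart, Bool.false_eq_true, reduceIte]⟩
            simp only [stepA, stepB, hf', hstart, Bool.false_eq_true, reduceIte]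
            rw [List.filter_append, List.map_append, C1]
            simp [C2]
        | some s =>
            rw [hstart] at C2
            obtain ⟨sn, hs, hsn, hne, hdd⟩ := C2
            refine ⟨?_, by simp only [stepA, stepB, hf', hstart, Bool.false_eq_true, reduceIte]⟩
            simp only [stepA, stepB, hf', hstart, Bool.false_eq_true, reduceIte]
            rw [List.filter_append, List.map_append, C1, List.map_append]
            congr 1
            have hslice : PySem.List.slice L (some s) (some ((k : Int) + 1)) =
                (L.drop sn).take (k - sn + 1) := by
              rw [hs, slice_run L sn k, show k + 1 - sn = k - sn + 1 by omega]
            simp [hne, hslice, hdd []]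

-- the ports as Nat-level folds
lemma pyrange_len_sub_one (L : List Int) :
    PySem.List.pyRange 0 ((L.length : Int) - 1) 1 = (List.range (L.length - 1)).map (fun i : Nat => (i : Int)) := by
  rw [PySem.List.pyRange_one]
  have h : ((L.length : Int) - 1 - 0).toNat = L.length - 1 := by omega
  rw [h]
  simp [List.map_eq_flatMap]

lemma foldl_map_eq {α β σ : Type} (g : α → β) (F : σ → β → σ) (fN : σ → α → σ)
    (h : ∀ s a, F s (g a) = fN s a) (l : List α) (s : σ) :
    (l.map g).foldl F s = l.foldl fN s := by
  induction l generalizing s with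
  | nil => rfl
  | cons x xs ih => simp only [List.map_cons, List.foldl_cons, h, ih]

lemma dizeng_eq_fold (L : List Int) (d : Int) :
    dizeng L d =
      (((List.range (L.length - 1)).foldl (stepA L d L.length) ([], [])).1.filter
          (fun x => !x.isEmpty)).map (ddF []) := by
  unfold dizeng
  rw [pyrange_len_sub_one]
  have hpt : ∀ (s : List (List Int) × List Int) (i : Nat),
      (fun (s : List (List Int) × List Int) (i : Int) =>
        if PySem.List.pyGetD L i 0 + d == PySem.List.pyGetD L (i + 1) 0 then
          if i == (L.length : Int) - 2 then
            (s.1 ++ [s.2 ++ [PySem.List.pyGetD L i 0, PySem.List.pyGetD L (i + 1) 0]],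
             s.2 ++ [PySem.List.pyGetD L i 0, PySem.List.pyGetD L (i + 1) 0])
          else (s.1, s.2 ++ [PySem.List.pyGetD L i 0, PySem.List.pyGetD L (i + 1) 0])
        else (s.1 ++ [s.2], ([] : List Int))) s ((i : Nat) : Int) = stepA L d L.length s i := by
    intro s i
    have h1 : ((i : Int) + 1) = ((i + 1 : Nat) : Int) := by push_cast; ring
    have h2 : ((i : Int) == (L.length : Int) - 2) = (i + 2 == L.length) := by
      rcases eq_or_ne (i + 2) L.length with h | h
      · have h' : (i : Int) = (L.length : Int) - 2 := by omega
        rw [h, h']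
        simp
      · have h' : (i : Int) ≠ (L.length : Int) - 2 := by omega
        rw [beq_eq_false_iff_ne.mpr h', beq_eq_false_iff_ne.mpr h]
    simp only [stepA, h1, PySem.List.pyGetD_natCast, h2]
  rw [foldl_map_eq (fun i : Nat => (i : Int)) _ (stepA L d L.length) hpt]
  rfl

lemma enumerate_map {α β : Type} (xs : List α) (f : α → β) (s : Int) :
    PySem.List.enumerate (xs.map f) s = (PySem.List.enumerate xs s).map (fun p => (p.1, f p.2)) := by
  induction xs generalizing s with
  | nil => simp [PySem.List.enumerate_nil]
  | cons x xs ih => simp [PySem.List.enumerate_cons, ih]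

lemma enumerate_range (m : Nat) :
    PySem.List.enumerate (List.range m) 0 = (List.range m).map (fun k : Nat => ((k : Int), k)) := by
  induction m with
  | zero => simp [PySem.List.enumerate_nil]
  | succ m ih =>
      rw [List.range_succ, PySem.List.enumerate_append, ih, List.map_append]
      simp [PySem.List.enumerate_cons, PySem.List.enumerate_nil]

lemma map_cast_flag (L : List Int) (d : Int) (m : Nat) :
    ((List.range m).map (fun i : Nat => (i : Int))).map
        (fun i => PySem.List.pyGetD L i 0 + d == PySem.List.pyGetD L (i + 1) 0) =
      (List.range m).map (fun i => L.getD i 0 + d == L.getD (i + 1) 0) := by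
  rw [List.map_map]
  apply List.map_congr_left
  intro i _
  simp only [Function.comp_apply]
  rw [show ((i : Int) + 1) = ((i + 1 : Nat) : Int) by push_cast; ring]
  rw [PySem.List.pyGetD_natCast, PySem.List.pyGetD_natCast]

lemma dizeng_alt_eq_fold (L : List Int) (d : Int) :
    dizeng_alt L d =
      (match ((List.range (L.length - 1)).foldl (stepB L d) ([], none)) with
        | (bs, some st0) => bs ++ [(st0, ((L.length - 1 : Nat) : Int))]
        | (bs, none) => bs).map
        (fun se : Int × Int => ddF [] (PySem.List.slice L (some se.1) (some (se.2 + 1)))) := by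
  unfold dizeng_alt
  rw [pyrange_len_sub_one, map_cast_flag, enumerate_map, enumerate_range, List.map_map]
  have hpt : ∀ (s : List (Int × Int) × Option Int) (k : Nat),
      (fun (s : List (Int × Int) × Option Int) (p : Int × Bool) =>
        if p.2 then
          match s.2 with
          | none => (s.1, some p.1)
          | some _ => s
        else
          match s.2 with
          | some st0 => (s.1 ++ [(st0, p.1)], none)
          | none => s)
        s (((fun (q : Int × Nat) => (q.1, L.getD q.2 0 + d == L.getD (q.2 + 1) 0)) ∘
            (fun k : Nat => ((k : Int), k))) k) = stepB L d s k := by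
    intro s k
    simp only [Function.comp, stepB]
  rw [foldl_map_eq ((fun (q : Int × Nat) => (q.1, L.getD q.2 0 + d == L.getD (q.2 + 1) 0)) ∘
      (fun k : Nat => ((k : Int), k))) _ (stepB L d) hpt]
  have hlen : ((List.range (L.length - 1)).map
      (fun i => L.getD i 0 + d == L.getD (i + 1) 0)).length = L.length - 1 := by simp
  rw [hlen]
  rfl

lemma dizeng_eq_alt (L : List Int) (d : Int) : dizeng L d = dizeng_alt L d := by
  rw [dizeng_eq_fold, dizeng_alt_eq_fold]
  by_cases hn : L.length ≤ 1
  · have h0 : L.length - 1 = 0 := by omega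
    rw [h0]
    simp
  · have hn2 : 2 ≤ L.length := by omega
    have hm : L.length - 1 = (L.length - 2) + 1 := by omega
    set k := L.length - 2 with hkdef
    have hk : k + 1 < L.length := by omega
    have hI := inv_main L d k hk
    unfold CoupInv at hI
    rw [hm, List.range_succ, List.foldl_append, List.foldl_append]
    cases hfoldA : (List.range k).foldl (stepA L d L.length) ([], []) with
    | mk asl l2 =>
    cases hfoldB : (List.range k).foldl (stepB L d) ([], none) with
    | mk bs o =>
    rw [hfoldA, hfoldB] at hI
    obtain ⟨C1, C2⟩ := hI
    dsimp only at C1 C2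
    simp only [List.foldl_cons, List.foldl_nil]
    have hg : (k + 2 == L.length) = true := by
      have : k + 2 = L.length := by omega
      simp [this]
    by_cases hf : (L.getD k 0 + d == L.getD (k + 1) 0) = true
    · cases o with
      | none =>
          have hl2 : l2 = [] := C2
          simp only [stepA, stepB, hf, hg, reduceIte]
          rw [List.filter_append, List.map_append, C1, List.map_append]
          congr 1
          have hslice : PySem.List.slice L (some ((k : Nat) : Int)) (some (((k + 1 : Nat) : Int) + 1)) =
              (L.drop k).take 2 := by
            rw [slice_run L k (k + 1), show k + 1 + 1 - k = 2 by omega]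
          rw [hl2]
          simp only [List.filter_cons, List.filter_nil]
          rw [if_pos (by simp)]
          simp only [List.map_cons, List.map_nil]
          rw [hslice, run_pair L k hk]
          simp [ddF, dstep, List.getD]
      | some s =>
          obtain ⟨sn, hs, hsn, hne, hdd⟩ := C2
          simp only [stepA, stepB, hf, hg, reduceIte]
          rw [List.filter_append, List.map_append, C1, List.map_append]
          congr 1
          have hslice : PySem.List.slice L (some s) (some (((k + 1 : Nat) : Int) + 1)) =
              (L.drop sn).take (k + 1 - sn + 1) := by
            rw [hs, slice_run L sn (k + 1), show k + 1 + 1 - sn = k + 1 - sn + 1 by omega]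
          simp only [List.filter_cons, List.filter_nil]
          rw [if_pos (by simp)]
          simp only [List.map_cons, List.map_nil, hslice]
          rw [ddF_extend L sn k l2 (by omega) hk hdd []]
    · have hf' : (L.getD k 0 + d == L.getD (k + 1) 0) = false := by
        simpa using hf
      cases o with
      | none =>
          have hl2 : l2 = [] := C2
          simp only [stepA, stepB, hf', Bool.false_eq_true, reduceIte]
          rw [List.filter_append, List.map_append, C1]
          simp [hl2]
      | some s =>
          obtain ⟨sn, hs, hsn, hne, hdd⟩ := C2
          simp only [stepA, stepB, hf', Bool.false_eq_true, reduceIte]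
          rw [List.filter_append, List.map_append, C1, List.map_append]
          congr 1
          have hslice : PySem.List.slice L (some s) (some ((k : Int) + 1)) =
              (L.drop sn).take (k - sn + 1) := by
            rw [hs, slice_run L sn k, show k + 1 - sn = k - sn + 1 by omega]
          simp [hne, hslice, hdd []]

-- ===== VERDICT (by name: the statement is the Claim_ definition above) =====
theorem dizeng_spec : Claim_equal_dizeng := by
  intro list diff_number _
  unfold Spec_dizeng
  exact dizeng_eq_alt list diff_number
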